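-- pv_equiv track=rewrite | github.com/gasflux/gasflux | ghgflux/processing.py | mCount
-- ===== SOURCE A (Python) =====
-- def mCount(dict):
--     poscount = 0
--     negcount = 0
--     max_pos_count = 0
--     max_pos_row = 0
--     max_neg_count = 0
--     max_neg_row = 0
--     pos_start = 0
--     neg_start = 0
--     for i in range(1, len(dict)):
--         if dict[i] >= dict[i - 1]:
--             poscount += 1
--             negcount = 0
--         elif dict[i] < dict[i - 1]:
--             negcount += 1
--             poscount = 0
--         if max_pos_count < poscount:
--             max_pos_count = poscount
--             max_pos_row = i
--             pos_start = i - poscount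
--         elif max_neg_count < negcount:
--             max_neg_count = negcount
--             max_neg_row = i
--             neg_start = i - negcount
--     if max_pos_count > 0 or max_neg_count > 0:
--         if max_pos_count >= max_neg_count:
--             return pos_start, max_pos_row
--         elif max_pos_count < max_neg_count:
--             return neg_start, max_neg_row
--     else:
--         return 0, 0
-- ===== SOURCE B (Python) =====
-- def _runs(flags):
--     """Run-length encode a list of booleans into [(flag, run_length), ...]."""
--     runs = []
--     i = 0
--     n = len(flags)
--     while i < n:
--         j = i + 1
--         while j < n and flags[j] == flags[i]:
--             j += 1
--         runs.append((flags[i], j - i))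
--         i = j
--     return runs
--
--
-- def mCount(dict):
--     # classify each adjacency, group into maximal runs, pick the earliest longest
--     flags = [b >= a for a, b in zip(dict, dict[1:])]
--     best_up = (0, 0, 0)   # (length, start_index, end_index)
--     best_dn = (0, 0, 0)
--     pos = 1               # original index of the element ending the run's first adjacency
--     for f, c in _runs(flags):
--         if f:
--             if best_up[0] < c:
--                 best_up = (c, pos - 1, pos - 1 + c)
--         else:
--             if best_dn[0] < c:
--                 best_dn = (c, pos - 1, pos - 1 + c)
--         pos += c
--     if best_up[0] >= best_dn[0]:
--         return best_up[1], best_up[2]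
--     return best_dn[1], best_dn[2]
-- ===== Notes on version B (the rewrite author's own statement) =====
-- stated objective: alternative
-- what changed: Replaces A's per-element loop with eight interleaved counters/records by a pipeline: classify each adjacency as up/down, run-length-encode the classification list, then scan the runs keeping the earliest strictly-longest up run and down run.
import Mathlib
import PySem

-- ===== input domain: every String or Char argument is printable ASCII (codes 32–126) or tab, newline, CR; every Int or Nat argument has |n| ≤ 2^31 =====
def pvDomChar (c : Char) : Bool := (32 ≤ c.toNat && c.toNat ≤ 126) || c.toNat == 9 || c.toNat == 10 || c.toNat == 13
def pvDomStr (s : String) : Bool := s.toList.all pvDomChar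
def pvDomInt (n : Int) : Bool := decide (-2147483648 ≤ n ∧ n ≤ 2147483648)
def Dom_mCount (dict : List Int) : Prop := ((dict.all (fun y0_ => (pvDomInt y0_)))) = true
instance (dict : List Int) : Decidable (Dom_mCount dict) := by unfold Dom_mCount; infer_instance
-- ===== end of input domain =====

-- B replaces A's single loop of interleaved counters by classify-adjacencies → run-length-encode → scan runs; same O(n) cost, different decomposition.


-- ===== PORT A =====
-- Python local variables of A's loop, one field per variable.
structure AState where
  poscount : Int
  negcount : Int
  mpc : Int   -- max_pos_count
  mpr : Int   -- max_pos_row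
  mnc : Int   -- max_neg_count
  mnr : Int   -- max_neg_row
  ps : Int    -- pos_start
  ns : Int    -- neg_start
deriving Repr, DecidableEq

-- A's loop body for index i (indices produced by range(1, len) are in bounds, so getD's default is never used).
def mCountStep (dict : List Int) (s : AState) (i : Nat) : AState :=
  let s1 :=
    if dict.getD i 0 ≥ dict.getD (i - 1) 0 then
      { s with poscount := s.poscount + 1, negcount := 0 }
    else if dict.getD i 0 < dict.getD (i - 1) 0 then
      { s with negcount := s.negcount + 1, poscount := 0 }
    else s
  if s1.mpc < s1.poscount then
    { s1 with mpc := s1.poscount, mpr := (i : Int), ps := (i : Int) - s1.poscount }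
  else if s1.mnc < s1.negcount then
    { s1 with mnc := s1.negcount, mnr := (i : Int), ns := (i : Int) - s1.negcount }
  else s1

def mCount (dict : List Int) : Int × Int :=
  let s := (List.range' 1 (dict.length - 1)).foldl (mCountStep dict) ⟨0, 0, 0, 0, 0, 0, 0, 0⟩
  if s.mpc > 0 ∨ s.mnc > 0 then
    if s.mpc ≥ s.mnc then (s.ps, s.mpr)
    else (s.ns, s.mnr)   -- Python's 'elif max_pos_count < max_neg_count' is the exact negation of the previous test
  else (0, 0)

-- ===== PORT B =====
-- _runs of Source B: the inner while-loop counts the equal prefix (takeWhile), the recursive call gets flags[k:] (dropWhile).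
def rleB (flags : List Bool) : List (Bool × Nat) :=
  match flags with
  | [] => []
  | f :: fs => (f, 1 + (fs.takeWhile (· == f)).length) :: rleB (fs.dropWhile (· == f))
termination_by flags.length
decreasing_by
  simp only [List.length_cons]
  exact Nat.lt_succ_of_le (List.length_dropWhile_le _ _)

-- Source B's loop over the runs: state (best_up, best_dn, pos).
def scanStep (st : (Int × Int × Int) × (Int × Int × Int) × Int) (r : Bool × Nat) :
    (Int × Int × Int) × (Int × Int × Int) × Int :=
  let bu := st.1; let bd := st.2.1; let pos := st.2.2
  let c : Int := (r.2 : Int)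
  if r.1 then
    if bu.1 < c then ((c, pos - 1, pos - 1 + c), bd, pos + c) else (bu, bd, pos + c)
  else
    if bd.1 < c then (bu, (c, pos - 1, pos - 1 + c), pos + c) else (bu, bd, pos + c)

def mCount_alt (dict : List Int) : Int × Int :=
  let flags := (dict.zip (dict.drop 1)).map (fun p => decide (p.2 ≥ p.1))
  let st := (rleB flags).foldl scanStep ((0, 0, 0), (0, 0, 0), 1)
  if st.1.1 ≥ st.2.1.1 then (st.1.2.1, st.1.2.2) else (st.2.1.2.1, st.2.1.2.2)

-- ===== PRECONDITION & SPEC =====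
def Spec_mCount (dict : List Int) (out : Int × Int) : Prop := out = mCount_alt dict
instance (dict : List Int) (out : Int × Int) : Decidable (Spec_mCount dict out) := by unfold Spec_mCount; infer_instance

-- ===== CLAIM (what is proved, stated in full; the proofs are below) =====
def Claim_equal_mCount : Prop := ∀ (dict : List Int), Dom_mCount dict → Spec_mCount dict (mCount dict)

-- ===== LEMMAS AND PROOFS =====

-- A's loop rephrased over the list of adjacency flags, with an Int position counter.
def stepAF (s : AState) (i : Int) (f : Bool) : AState :=
  let s1 :=
    if f then { s with poscount := s.poscount + 1, negcount := 0 }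
    else { s with negcount := s.negcount + 1, poscount := 0 }
  if s1.mpc < s1.poscount then
    { s1 with mpc := s1.poscount, mpr := i, ps := i - s1.poscount }
  else if s1.mnc < s1.negcount then
    { s1 with mnc := s1.negcount, mnr := i, ns := i - s1.negcount }
  else s1

def foldA (flags : List Bool) (i : Int) (s : AState) : AState :=
  match flags with
  | [] => s
  | f :: fs => foldA fs (i + 1) (stepAF s i f)

theorem foldA_append (l1 l2 : List Bool) (i : Int) (s : AState) :
    foldA (l1 ++ l2) i s = foldA l2 (i + l1.length) (foldA l1 i s) := by
  induction l1 generalizing i s with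
  | nil => simp [foldA]
  | cons f fs ih => simp [foldA, ih]; ring_nf

theorem step_bridge (dict : List Int) (s : AState) (k : Nat) :
    mCountStep dict s k = stepAF s (k : Int) (decide (dict.getD k 0 ≥ dict.getD (k - 1) 0)) := by
  by_cases h : dict.getD k 0 ≥ dict.getD (k - 1) 0
  · simp only [mCountStep, stepAF, h, decide_true, if_true]
  · have h2 : dict.getD k 0 < dict.getD (k - 1) 0 := lt_of_not_ge h
    simp only [mCountStep, stepAF, if_neg h, if_pos h2, decide_eq_false h, Bool.false_eq_true,
      if_false]

theorem mCount_foldA (dict : List Int) : ∀ (m k : Nat) (s : AState),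
    (List.range' k m).foldl (mCountStep dict) s
      = foldA ((List.range' k m).map (fun j => decide (dict.getD j 0 ≥ dict.getD (j - 1) 0))) (k : Int) s := by
  intro m
  induction m with
  | zero => intro k s; simp [foldA]
  | succ m ih =>
    intro k s
    rw [List.range'_succ]
    simp only [List.foldl_cons, List.map_cons, foldA]
    rw [ih, step_bridge]
    norm_num

theorem flags_zip_eq (dict : List Int) :
    (dict.zip (dict.drop 1)).map (fun p => decide (p.2 ≥ p.1))
      = (List.range' 1 (dict.length - 1)).map (fun j => decide (dict.getD j 0 ≥ dict.getD (j - 1) 0)) := by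
  apply List.ext_getElem
  · simp [List.length_zip]
  · intro i h1 h2
    simp only [List.getElem_map, List.getElem_zip, List.getElem_drop, List.getElem_range']
    have hlen : i + 1 < dict.length := by
      simp [List.length_zip] at h1; omega
    have hA : dict.getD (1 + 1 * i) 0 = dict[1 + i]'(by omega) := by
      rw [List.getD_eq_getElem _ _ (by omega)]
      congr 1; omega
    have hB : dict.getD (1 + 1 * i - 1) 0 = dict[i] := by
      rw [List.getD_eq_getElem _ _ (by omega)]
      congr 1; omega
    rw [hA, hB]

theorem upRun : ∀ (k : Nat) (i : Int) (s : AState), 0 ≤ s.mnc →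
    foldA (List.replicate (k + 1) true) i s =
      { s with
        poscount := s.poscount + k + 1
        negcount := 0
        mpc := if s.mpc < s.poscount + k + 1 then s.poscount + k + 1 else s.mpc
        ps := if s.mpc < s.poscount + k + 1 then i - s.poscount - 1 else s.ps
        mpr := if s.mpc < s.poscount + k + 1 then i + k else s.mpr } := by
  intro k
  induction k with
  | zero =>
    intro i s hmnc
    simp only [List.replicate, foldA, stepAF, if_true]
    split_ifs with h1 h2 <;> simp [AState.mk.injEq] <;> omega
  | succ k ih =>
    intro i s hmnc
    have hrep : List.replicate (k + 1 + 1) true = true :: List.replicate (k + 1) true := rfl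
    rw [hrep]
    simp only [foldA]
    rw [ih]
    · simp only [stepAF, if_true]
      by_cases h1 : s.mpc < s.poscount + 1
      · simp only [if_pos h1]
        simp [AState.mk.injEq]
        refine ⟨by omega, ?_, ?_, ?_⟩ <;> first | (split_ifs <;> omega) | omega | (intro _; omega)
      · have h2 : ¬ s.mnc < (0 : Int) := not_lt.mpr hmnc
        simp only [if_neg h1, if_neg h2]
        simp [AState.mk.injEq]
        refine ⟨by omega, ?_, ?_, ?_⟩ <;> first | (split_ifs <;> omega) | omega | (intro _; omega)
    · simp only [stepAF, if_true]
      split_ifs <;> simp <;> omega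

theorem dnRun : ∀ (k : Nat) (i : Int) (s : AState), 0 ≤ s.mpc →
    foldA (List.replicate (k + 1) false) i s =
      { s with
        negcount := s.negcount + k + 1
        poscount := 0
        mnc := if s.mnc < s.negcount + k + 1 then s.negcount + k + 1 else s.mnc
        ns := if s.mnc < s.negcount + k + 1 then i - s.negcount - 1 else s.ns
        mnr := if s.mnc < s.negcount + k + 1 then i + k else s.mnr } := by
  intro k
  induction k with
  | zero =>
    intro i s hmpc
    simp only [List.replicate, foldA, stepAF, Bool.false_eq_true, if_false]
    have h0 : ¬ s.mpc < (0 : Int) := not_lt.mpr hmpc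
    rw [if_neg h0]
    split_ifs with h1 <;> simp [AState.mk.injEq] <;> omega
  | succ k ih =>
    intro i s hmpc
    have hrep : List.replicate (k + 1 + 1) false = false :: List.replicate (k + 1) false := rfl
    rw [hrep]
    simp only [foldA]
    rw [ih]
    · simp only [stepAF, Bool.false_eq_true, if_false]
      have h0 : ¬ s.mpc < (0 : Int) := not_lt.mpr hmpc
      rw [if_neg h0]
      by_cases h1 : s.mnc < s.negcount + 1
      · simp only [if_pos h1]
        simp [AState.mk.injEq]
        refine ⟨by omega, ?_, ?_, ?_⟩ <;> first | (split_ifs <;> omega) | omega | (intro _; omega)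
      · simp only [if_neg h1]
        simp [AState.mk.injEq]
        refine ⟨by omega, ?_, ?_, ?_⟩ <;> first | (split_ifs <;> omega) | omega | (intro _; omega)
    · simp only [stepAF, Bool.false_eq_true, if_false]
      have h0 : ¬ s.mpc < (0 : Int) := not_lt.mpr hmpc
      rw [if_neg h0]
      split_ifs <;> simp <;> omega

theorem cons_decomp (f : Bool) (fs : List Bool) :
    f :: fs = List.replicate ((fs.takeWhile (· == f)).length + 1) f ++ fs.dropWhile (· == f) := by
  have ht : fs.takeWhile (· == f) = List.replicate (fs.takeWhile (· == f)).length f := by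
    apply List.eq_replicate_of_mem
    intro b hb
    have := List.mem_takeWhile_imp hb
    simpa using this
  calc f :: fs = f :: (fs.takeWhile (· == f) ++ fs.dropWhile (· == f)) := by
        rw [List.takeWhile_append_dropWhile]
    _ = List.replicate ((fs.takeWhile (· == f)).length + 1) f ++ fs.dropWhile (· == f) := by
        rw [List.replicate_succ, List.cons_append, ← ht]

theorem head_dropWhile (f : Bool) (fs : List Bool) :
    (fs.dropWhile (· == f)).head? ≠ some f := by
  induction fs with
  | nil => simp [List.dropWhile]
  | cons a as ih =>
    by_cases h : a = f
    · simpa [List.dropWhile, h] using ih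
    · have hb : (a == f) = false := by simp [h]
      simp [List.dropWhile, hb, h]

theorem scan_rle : ∀ (flags : List Bool) (i : Int) (s : AState),
    (flags.head? = some true → s.poscount = 0) →
    (flags.head? = some false → s.negcount = 0) →
    0 ≤ s.mpc → 0 ≤ s.mnc →
    (rleB flags).foldl scanStep ((s.mpc, s.ps, s.mpr), (s.mnc, s.ns, s.mnr), i)
      = (((foldA flags i s).mpc, (foldA flags i s).ps, (foldA flags i s).mpr),
         ((foldA flags i s).mnc, (foldA flags i s).ns, (foldA flags i s).mnr),
         i + flags.length) := by
  intro flags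
  induction flags using rleB.induct with
  | case1 => intro i s _ _ _ _; simp [rleB, foldA]
  | case2 f fs ih =>
    intro i s hpos hneg hmpc hmnc
    rw [rleB]
    set k := (fs.takeWhile (· == f)).length with hk
    set rest := fs.dropWhile (· == f) with hrest
    have hdec : f :: fs = List.replicate (k + 1) f ++ rest := cons_decomp f fs
    have hlen : ((f :: fs).length : Int) = (k + 1) + rest.length := by
      rw [hdec]; push_cast; simp
    rw [List.foldl_cons]
    by_cases hf : f = true
    · subst hf
      have hp0 : s.poscount = 0 := hpos (by rfl)
      have hup := upRun k i s hmnc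
      rw [hp0] at hup
      simp only [zero_add, sub_zero] at hup
      have hfold : foldA (true :: fs) i s
          = foldA rest (i + (k + 1)) (foldA (List.replicate (k + 1) true) i s) := by
        rw [hdec, foldA_append, List.length_replicate]; push_cast; try rfl
      have hstep : scanStep ((s.mpc, s.ps, s.mpr), (s.mnc, s.ns, s.mnr), i) (true, 1 + k)
          = (((foldA (List.replicate (k + 1) true) i s).mpc, (foldA (List.replicate (k + 1) true) i s).ps, (foldA (List.replicate (k + 1) true) i s).mpr), ((foldA (List.replicate (k + 1) true) i s).mnc, (foldA (List.replicate (k + 1) true) i s).ns, (foldA (List.replicate (k + 1) true) i s).mnr), i + (k + 1)) := by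
        rw [hup]
        simp only [scanStep]
        split_ifs with h1 h2 <;> simp [Prod.ext_iff] <;> push_cast at * <;> omega
      rw [hstep]
      rw [ih (i + (k + 1)) _ ?_ ?_ ?_ ?_]
      · rw [hfold, hlen]; ring_nf
      · intro habs
        exact absurd habs (by rw [hrest]; exact head_dropWhile true fs)
      · intro _
        rw [hup]
      · rw [hup]; simp; omega
      · rw [hup]; simp; omega
    · have hf' : f = false := by cases f <;> simp_all
      subst hf'
      have hn0 : s.negcount = 0 := hneg (by rfl)
      have hdn := dnRun k i s hmpc
      rw [hn0] at hdn
      simp only [zero_add, sub_zero] at hdn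
      have hfold : foldA (false :: fs) i s
          = foldA rest (i + (k + 1)) (foldA (List.replicate (k + 1) false) i s) := by
        rw [hdec, foldA_append, List.length_replicate]; push_cast; try rfl
      have hstep : scanStep ((s.mpc, s.ps, s.mpr), (s.mnc, s.ns, s.mnr), i) (false, 1 + k)
          = (((foldA (List.replicate (k + 1) false) i s).mpc, (foldA (List.replicate (k + 1) false) i s).ps, (foldA (List.replicate (k + 1) false) i s).mpr), ((foldA (List.replicate (k + 1) false) i s).mnc, (foldA (List.replicate (k + 1) false) i s).ns, (foldA (List.replicate (k + 1) false) i s).mnr), i + (k + 1)) := by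
        rw [hdn]
        simp only [scanStep]
        split_ifs with h1 h2 <;> simp [Prod.ext_iff] <;> push_cast at * <;> omega
      rw [hstep]
      rw [ih (i + (k + 1)) _ ?_ ?_ ?_ ?_]
      · rw [hfold, hlen]; ring_nf
      · intro _
        rw [hdn]
      · intro habs
        exact absurd habs (by rw [hrest]; exact head_dropWhile false fs)
      · rw [hdn]; simp; omega
      · rw [hdn]; simp; omega

theorem stepAF_mono (s : AState) (i : Int) (f : Bool) :
    s.mpc ≤ (stepAF s i f).mpc ∧ s.mnc ≤ (stepAF s i f).mnc := by
  simp only [stepAF]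
  split_ifs <;> simp_all <;> omega

theorem foldA_mono : ∀ (flags : List Bool) (i : Int) (s : AState),
    s.mpc ≤ (foldA flags i s).mpc ∧ s.mnc ≤ (foldA flags i s).mnc := by
  intro flags
  induction flags with
  | nil => intro i s; exact ⟨le_refl _, le_refl _⟩
  | cons f fs ih =>
    intro i s
    simp only [foldA]
    have h1 := stepAF_mono s i f
    have h2 := ih (i + 1) (stepAF s i f)
    exact ⟨le_trans h1.1 h2.1, le_trans h1.2 h2.2⟩

theorem final_bridge (flags : List Bool) :
    (if (foldA flags 1 ⟨0,0,0,0,0,0,0,0⟩).mpc > 0 ∨ (foldA flags 1 ⟨0,0,0,0,0,0,0,0⟩).mnc > 0 then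
       if (foldA flags 1 ⟨0,0,0,0,0,0,0,0⟩).mpc ≥ (foldA flags 1 ⟨0,0,0,0,0,0,0,0⟩).mnc then
         ((foldA flags 1 ⟨0,0,0,0,0,0,0,0⟩).ps, (foldA flags 1 ⟨0,0,0,0,0,0,0,0⟩).mpr)
       else ((foldA flags 1 ⟨0,0,0,0,0,0,0,0⟩).ns, (foldA flags 1 ⟨0,0,0,0,0,0,0,0⟩).mnr)
     else (0, 0))
    = (if (foldA flags 1 ⟨0,0,0,0,0,0,0,0⟩).mpc ≥ (foldA flags 1 ⟨0,0,0,0,0,0,0,0⟩).mnc then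
         ((foldA flags 1 ⟨0,0,0,0,0,0,0,0⟩).ps, (foldA flags 1 ⟨0,0,0,0,0,0,0,0⟩).mpr)
       else ((foldA flags 1 ⟨0,0,0,0,0,0,0,0⟩).ns, (foldA flags 1 ⟨0,0,0,0,0,0,0,0⟩).mnr)) := by
  cases flags with
  | nil => norm_num [foldA]
  | cons f fs =>
    have hp : (0 : Int) < (foldA (f :: fs) 1 ⟨0,0,0,0,0,0,0,0⟩).mpc ∨
        (0 : Int) < (foldA (f :: fs) 1 ⟨0,0,0,0,0,0,0,0⟩).mnc := by
      simp only [foldA]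
      have hm := foldA_mono fs (1 + 1) (stepAF ⟨0,0,0,0,0,0,0,0⟩ 1 f)
      cases f
      · right
        refine lt_of_lt_of_le ?_ hm.2
        simp [stepAF]
      · left
        refine lt_of_lt_of_le ?_ hm.1
        simp [stepAF]
    rw [if_pos (by omega)]

-- ===== VERDICT (by name: the statement is the Claim_ definition above) =====
theorem mCount_spec : Claim_equal_mCount := by
  intro dict _
  unfold Spec_mCount mCount mCount_alt
  rw [flags_zip_eq]
  rw [mCount_foldA dict (dict.length - 1) 1]
  have hscan := scan_rle
    ((List.range' 1 (dict.length - 1)).map (fun j => decide (dict.getD j 0 ≥ dict.getD (j - 1) 0)))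
    1 ⟨0, 0, 0, 0, 0, 0, 0, 0⟩ (fun _ => rfl) (fun _ => rfl) (le_refl 0) (le_refl 0)
  simp only [Nat.cast_one] at *
  rw [hscan]
  simp only []
  exact final_bridge _
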